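-- pv_equiv track=rewrite | github.com/Seal-Li/LeetCode | interviews/58/longest_norepeat_subsequence.py | longest_norepeate_subsequence
-- ===== SOURCE A (Python) =====
-- def longest_norepeate_subsequence(seq):
--     max_len = 1
--     cur_len = 1
--     cur_char = seq[0]
--     for char in seq[1:]:
--         if char != cur_char:
--             cur_len += 1
--         else:
--             cur_len = 1
--         max_len = max(max_len, cur_len)
--         cur_char = char
--     return max_len
-- ===== SOURCE B (Python) =====
-- def longest_norepeate_subsequence(seq):
--     n = len(seq)
--     cuts = [0] + [i for i, (a, b) in enumerate(zip(seq, seq[1:]), 1) if a == b] + [n]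
--     return max(b - a for a, b in zip(cuts, cuts[1:]))
-- ===== Notes on version B (the rewrite author's own statement) =====
-- stated objective: alternative
-- what changed: Instead of threading a running (max_len, cur_len, cur_char) state through one loop, B collects the positions where adjacent characters are equal as segment boundaries and returns the largest gap between consecutive boundaries (prefix and suffix included).
import Mathlib
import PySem

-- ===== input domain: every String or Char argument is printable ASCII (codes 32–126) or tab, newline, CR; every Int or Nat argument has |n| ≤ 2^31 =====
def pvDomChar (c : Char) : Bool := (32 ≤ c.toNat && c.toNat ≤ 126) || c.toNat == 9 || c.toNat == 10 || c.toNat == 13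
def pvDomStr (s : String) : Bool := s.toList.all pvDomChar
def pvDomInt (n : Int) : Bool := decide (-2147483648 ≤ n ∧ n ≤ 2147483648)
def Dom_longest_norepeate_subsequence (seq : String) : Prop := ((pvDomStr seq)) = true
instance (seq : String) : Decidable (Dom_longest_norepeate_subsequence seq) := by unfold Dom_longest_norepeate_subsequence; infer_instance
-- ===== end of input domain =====

-- B replaces A's running (max_len, cur_len, cur_char) scan by a boundary/gap decomposition
-- (same O(n) cost, different structure); return-value equivalence only — neither mutates.

-- ===== PORT A =====
def longest_norepeate_subsequence (seq : String) : Int :=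
  match PySem.List.pyGet? seq.toList 0 with
  | none => 0   -- seq[0] raises IndexError on the empty string; excluded by Pre_
  | some c0 =>
    let st := (PySem.List.slice seq.toList (some 1) none).foldl
      (fun (s : Int × Int × Char) ch =>
        let cur_len : Int := if ch ≠ s.2.2 then s.2.1 + 1 else 1
        (max s.1 cur_len, cur_len, ch)) (1, 1, c0)
    st.1

-- ===== PORT B =====
def longest_norepeate_subsequence_alt (seq : String) : Int :=
  let l := seq.toList
  let n : Int := l.length
  let cuts : List Int :=
    0 :: ((PySem.List.enumerate (l.zip l.tail) 1).filter
            (fun p => p.2.1 == p.2.2)).map (fun p => p.1) ++ [n]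
  let gaps := (cuts.zip cuts.tail).map (fun p => p.2 - p.1)
  match PySem.List.max? gaps (fun x => x) with
  | some m => m
  | none => 0   -- unreachable: cuts always has ≥ 2 elements, so gaps ≠ []

-- ===== PRECONDITION & SPEC =====
-- A reads seq[0], so it raises IndexError exactly on the empty string.
def Pre_longest_norepeate_subsequence (seq : String) : Prop := seq ≠ ""
instance (seq : String) : Decidable (Pre_longest_norepeate_subsequence seq) := by unfold Pre_longest_norepeate_subsequence; infer_instance
def pvWitness_longest_norepeate_subsequence : String := "ab"

def Spec_longest_norepeate_subsequence (seq : String) (out : Int) : Prop := out = longest_norepeate_subsequence_alt seq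
instance (seq : String) (out : Int) : Decidable (Spec_longest_norepeate_subsequence seq out) := by unfold Spec_longest_norepeate_subsequence; infer_instance

-- ===== CLAIM (what is proved, stated in full; the proofs are below) =====
def Claim_equal_longest_norepeate_subsequence : Prop := ∀ (seq : String), Dom_longest_norepeate_subsequence seq → Pre_longest_norepeate_subsequence seq → Spec_longest_norepeate_subsequence seq (longest_norepeate_subsequence seq)

-- ===== LEMMAS AND PROOFS =====

-- A's loop body and B's pieces, as standalone functions of the character list.
def pvStep (s : Int × Int × Char) (ch : Char) : Int × Int × Char :=
  let cur_len : Int := if ch ≠ s.2.2 then s.2.1 + 1 else 1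
  (max s.1 cur_len, cur_len, ch)

def pvBnds (l : List Char) : List Int :=
  ((PySem.List.enumerate (l.zip l.tail) 1).filter (fun p => p.2.1 == p.2.2)).map (fun p => p.1)

def pvCuts (l : List Char) : List Int := 0 :: pvBnds l ++ [(l.length : Int)]

def pvGaps (l : List Char) : List Int := ((pvCuts l).zip (pvCuts l).tail).map (fun p => p.2 - p.1)

def pvM (l : List Char) : Int :=
  match PySem.List.max? (pvGaps l) (fun x => x) with
  | some m => m
  | none => 0

def pvLastCut (l : List Char) : Int := (0 :: pvBnds l).getLastD 0

lemma pv_getLast_eq_getLastD {α : Type} (l : List α) (d : α) (h : l ≠ []) :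
    l.getLast h = l.getLastD d := by
  cases l with
  | nil => exact absurd rfl h
  | cons a t =>
    simp [List.getLastD_eq_getLast?, List.getLast?_eq_some_getLast (l := a :: t) (by simp)]

-- adjacent pairs of l ++ [x]
lemma pv_zip_tail_append {α : Type} (l : List α) (x : α) (h : l ≠ []) :
    (l ++ [x]).zip (l ++ [x]).tail = l.zip l.tail ++ [(l.getLast h, x)] := by
  induction l with
  | nil => exact absurd rfl h
  | cons a t ih =>
    cases t with
    | nil => simp
    | cons b t' =>
      have ihh := ih (by simp)
      simp only [List.cons_append, List.tail_cons, List.zip_cons_cons] at ihh ⊢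
      rw [ihh]
      simp [List.getLast_cons]

lemma pv_max?_id_append_singleton (ys : List Int) (z : Int) :
    PySem.List.max? (ys ++ [z]) (fun x => x) =
      some (match PySem.List.max? ys (fun x => x) with | some m => max m z | none => z) := by
  cases ys with
  | nil =>
    rw [show (([] : List Int) ++ [z]) = z :: [] from rfl, PySem.List.max?_id_cons,
        show PySem.List.max? ([] : List Int) (fun x => x) = none from by rw [PySem.List.max?_eq_none_iff]]
    simp
  | cons y yt =>
    simp [PySem.List.max?_id_cons, List.foldl_append]

lemma pv_bnds_append (l : List Char) (x : Char) (h : l ≠ []) :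
    pvBnds (l ++ [x]) =
      pvBnds l ++ (if l.getLast h = x then [(l.length : Int)] else []) := by
  unfold pvBnds
  rw [pv_zip_tail_append l x h, PySem.List.enumerate_append, List.filter_append, List.map_append]
  have h1 : 1 ≤ l.length := List.length_pos_of_ne_nil h
  have hlen : (l.zip l.tail).length = l.length - 1 := by
    cases l with
    | nil => simp
    | cons a t => simp [List.length_zip]
  simp only [PySem.List.enumerate_cons, PySem.List.enumerate_nil]
  by_cases hx : l.getLast h = x
  · simp [hx]
    omega
  · simp [hx]

lemma pv_getLastD_cons_concat (bs : List Int) (z : Int) :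
    ((0 : Int) :: (bs ++ [z])).getLastD 0 = z := by
  rw [← List.cons_append, List.getLastD_concat]

-- the gap list of l decomposes as (gaps within 0::bnds) ++ [length - last cut]
lemma pv_gaps_decomp (l : List Char) :
    pvGaps l = (((0 :: pvBnds l).zip (0 :: pvBnds l).tail).map (fun p => p.2 - p.1))
      ++ [(l.length : Int) - pvLastCut l] := by
  unfold pvGaps pvCuts
  rw [show ((0 : Int) :: pvBnds l ++ [(l.length : Int)]) = ((0 : Int) :: pvBnds l) ++ [(l.length : Int)] from by simp,
      pv_zip_tail_append ((0 : Int) :: pvBnds l) _ (by simp), List.map_append]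
  rw [pv_getLast_eq_getLastD _ 0]
  simp [pvLastCut]

-- the main invariant: A's loop state over c::t is (max gap, length - last cut, last char)
lemma pv_main (c : Char) (t : List Char) :
    t.foldl pvStep (1, 1, c) =
      (pvM (c :: t), ((c :: t).length : Int) - pvLastCut (c :: t), t.getLastD c)
    ∧ 1 ≤ pvM (c :: t) := by
  induction t using List.reverseRecOn with
  | nil =>
    constructor
    · simp [pvM, pvGaps, pvCuts, pvBnds, pvLastCut, PySem.List.max?_id_cons]
    · simp [pvM, pvGaps, pvCuts, pvBnds, PySem.List.max?_id_cons]
  | append_singleton t' x ih =>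
    obtain ⟨ih1, ih2⟩ := ih
    have hne : (c :: t') ≠ [] := by simp
    have hcons : c :: (t' ++ [x]) = (c :: t') ++ [x] := by simp
    have hlenI : ((c :: (t' ++ [x])).length : Int) = ((c :: t').length : Int) + 1 := by
      push_cast [List.length_append, List.length_cons]
      simp
    have hlast : (c :: t').getLast hne = t'.getLastD c := by
      rw [pv_getLast_eq_getLastD _ c]
      cases t' <;> simp
    have hbnds := pv_bnds_append (c :: t') x hne
    rw [hlast] at hbnds
    have hgaps := pv_gaps_decomp (c :: t')
    have hM : PySem.List.max? (pvGaps (c :: t')) (fun y => y) = some (pvM (c :: t')) := by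
      rw [hgaps, pv_max?_id_append_singleton]
      unfold pvM
      rw [hgaps, pv_max?_id_append_singleton]
    rw [List.foldl_append, ih1]
    simp only [List.foldl_cons, List.foldl_nil]
    by_cases hx : t'.getLastD c = x
    · -- repeated char: new boundary at position (c::t').length, current run resets to 1
      have hb : pvBnds (c :: (t' ++ [x])) = pvBnds (c :: t') ++ [((c :: t').length : Int)] := by
        rw [hcons, hbnds, if_pos hx]
      have hlc : pvLastCut (c :: (t' ++ [x])) = ((c :: t').length : Int) := by
        unfold pvLastCut
        rw [hb]
        exact pv_getLastD_cons_concat _ _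
      have hlastcut : (pvCuts (c :: t')).getLast (by simp [pvCuts]) = ((c :: t').length : Int) := by
        rw [pv_getLast_eq_getLastD _ 0]
        unfold pvCuts
        exact pv_getLastD_cons_concat _ _
      have hcuts : pvCuts (c :: (t' ++ [x])) = pvCuts (c :: t') ++ [((c :: t').length : Int) + 1] := by
        unfold pvCuts
        rw [hb, hlenI]
        simp
      have hg' : pvGaps (c :: (t' ++ [x])) = pvGaps (c :: t') ++ [1] := by
        unfold pvGaps
        rw [hcuts, pv_zip_tail_append (pvCuts (c :: t')) _ (by simp [pvCuts]), List.map_append,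
            hlastcut]
        simp [pvGaps]
      have hM' : pvM (c :: (t' ++ [x])) = max (pvM (c :: t')) 1 := by
        unfold pvM
        rw [hg', pv_max?_id_append_singleton, hM]
      have hstep : pvStep (pvM (c :: t'), ((c :: t').length : Int) - pvLastCut (c :: t'), t'.getLastD c) x
          = (max (pvM (c :: t')) 1, 1, x) := by
        have hx2 : t'.getLast?.getD c = x := by simpa [List.getLastD_eq_getLast?] using hx
        simp [pvStep, hx2]
      refine ⟨?_, by rw [hM']; omega⟩
      rw [hstep, hM', hlc, hlenI]
      refine Prod.ext ?_ (Prod.ext ?_ ?_) <;> simp <;> try omega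
    · -- fresh char: boundaries unchanged, current run grows by 1
      have hb : pvBnds (c :: (t' ++ [x])) = pvBnds (c :: t') := by
        rw [hcons, hbnds, if_neg hx]
        simp
      have hlc : pvLastCut (c :: (t' ++ [x])) = pvLastCut (c :: t') := by
        unfold pvLastCut
        rw [hb]
      have hg' : pvGaps (c :: (t' ++ [x])) =
          (((0 :: pvBnds (c :: t')).zip (0 :: pvBnds (c :: t')).tail).map (fun p => p.2 - p.1))
            ++ [((c :: (t' ++ [x])).length : Int) - pvLastCut (c :: t')] := by
        have hh := pv_gaps_decomp (c :: (t' ++ [x]))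
        rw [hb, hlc] at hh
        exact hh
      have hM' : pvM (c :: (t' ++ [x]))
          = max (pvM (c :: t')) (((c :: t').length : Int) - pvLastCut (c :: t') + 1) := by
        unfold pvM
        rw [hg', hgaps, pv_max?_id_append_singleton, pv_max?_id_append_singleton, hlenI]
        cases hh : PySem.List.max? (((0 :: pvBnds (c :: t')).zip (0 :: pvBnds (c :: t')).tail).map (fun p => p.2 - p.1)) (fun y => y) with
        | none =>
          simp [max_def]
          linarith
        | some m0 =>
          simp [max_def]
          split_ifs <;> linarith
      have hstep : pvStep (pvM (c :: t'), ((c :: t').length : Int) - pvLastCut (c :: t'), t'.getLastD c) x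
          = (max (pvM (c :: t')) (((c :: t').length : Int) - pvLastCut (c :: t') + 1),
             ((c :: t').length : Int) - pvLastCut (c :: t') + 1, x) := by
        have hx2 : ¬ t'.getLast?.getD c = x := by simpa [List.getLastD_eq_getLast?] using hx
        have hx3 : ¬ x = t'.getLast?.getD c := fun hc => hx2 hc.symm
        simp [pvStep, hx3]
      refine ⟨?_, by rw [hM']; omega⟩
      rw [hstep, hM', hlc, hlenI]
      refine Prod.ext ?_ (Prod.ext ?_ ?_) <;> simp <;> try omega

-- B's port computes pvM
lemma pv_alt_eq (seq : String) : longest_norepeate_subsequence_alt seq = pvM seq.toList := by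
  rfl

-- ===== VERDICT (by name: the statement is the Claim_ definition above) =====
theorem longest_norepeate_subsequence_spec : Claim_equal_longest_norepeate_subsequence := by
  intro seq _ hpre
  unfold Spec_longest_norepeate_subsequence
  rw [pv_alt_eq]
  have htl : seq.toList ≠ [] := by
    intro hc
    exact hpre (by cases seq; simp_all)
  obtain ⟨c, t, hct⟩ := List.exists_cons_of_ne_nil htl
  unfold longest_norepeate_subsequence
  rw [hct]
  simp only [PySem.List.pyGet?_zero_cons, PySem.List.slice_from_one, List.tail_cons]
  have := (pv_main c t).1
  show (t.foldl pvStep (1, 1, c)).1 = pvM (c :: t)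
  rw [this]
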